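-- pv_equiv track=rewrite | github.com/andersonAlmeida/exercicio-python-ap2 | exercicio-lista/exercicios.py | encontraNumParEntreImpars
-- ===== SOURCE A (Python) =====
-- def encontraNumParEntreImpars( lista ):
--     resultado = []
--     i = 0
--
--     if len(lista) > 2:
--         for val in lista:
--             if i > 0 and i <= (len(lista) - 2) and val % 2 == 0:
--                 if lista[i-1] % 2 != 0:
--                     if lista[i+1] % 2 != 0:
--                         resultado.append( val )
--             i += 1
--
--     return resultado
-- ===== SOURCE B (Python) =====
-- def encontraNumParEntreImpars(lista):
--     # stage 1: run-length group the list into maximal runs of equal parity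
--     runs = []
--     cur = []
--     for x in lista:
--         if cur and cur[0] % 2 == x % 2:
--             cur.append(x)
--         else:
--             if cur:
--                 runs.append(cur)
--             cur = [x]
--     if cur:
--         runs.append(cur)
--     # stage 2: an even number with two odd neighbours is exactly an interior
--     # singleton even-parity run (its neighbours sit in adjacent odd runs)
--     return [run[0] for run in runs[1:-1] if len(run) == 1 and run[0] % 2 == 0]
-- ===== Notes on version B (the rewrite author's own statement) =====
-- stated objective: alternative
-- what changed: Replaces the per-index neighbour test with a two-stage run-length algorithm: group the list into maximal runs of equal parity, then keep the interior singleton even runs (an even number with two odd neighbours is exactly such a run).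
import Mathlib
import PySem

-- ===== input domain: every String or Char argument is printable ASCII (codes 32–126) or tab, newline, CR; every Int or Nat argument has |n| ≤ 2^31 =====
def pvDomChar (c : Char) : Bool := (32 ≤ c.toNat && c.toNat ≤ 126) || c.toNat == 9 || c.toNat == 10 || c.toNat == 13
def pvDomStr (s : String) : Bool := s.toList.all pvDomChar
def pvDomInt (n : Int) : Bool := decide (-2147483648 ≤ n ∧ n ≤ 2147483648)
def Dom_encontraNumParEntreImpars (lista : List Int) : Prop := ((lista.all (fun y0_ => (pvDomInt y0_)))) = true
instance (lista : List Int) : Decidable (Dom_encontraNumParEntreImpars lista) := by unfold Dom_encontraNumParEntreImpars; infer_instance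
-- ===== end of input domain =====

-- B replaces A's per-index neighbour test by a two-stage run-length algorithm:
-- group the list into maximal runs of equal parity, then keep the interior
-- singleton even runs (an even number with two odd neighbours is exactly that).

-- ===== PORT A =====
-- loop body of A: state = (resultado, i); lookups lista[i-1]/lista[i+1] via pyGet?
-- (the 'none' match arms are Python's IndexError, unreachable under the guarding ifs)
def pvStepA (lista : List Int) (st : List Int × Int) (val : Int) : List Int × Int :=
  let res :=
    if st.2 > 0 ∧ st.2 ≤ (lista.length : Int) - 2 ∧ PySem.Int.mod val 2 = 0 then
      match PySem.List.pyGet? lista (st.2 - 1) with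
      | none => st.1
      | some a =>
        if PySem.Int.mod a 2 ≠ 0 then
          match PySem.List.pyGet? lista (st.2 + 1) with
          | none => st.1
          | some c => if PySem.Int.mod c 2 ≠ 0 then st.1 ++ [val] else st.1
        else st.1
    else st.1
  (res, st.2 + 1)

def encontraNumParEntreImpars (lista : List Int) : List Int :=
  if (lista.length : Int) > 2 then (lista.foldl (pvStepA lista) ([], 0)).1 else []

-- ===== PORT B =====
-- stage-1 loop body of Source B: state = (runs, cur); 'cur and cur[0]%2 == x%2'
def pvStepB (st : List (List Int) × List Int) (x : Int) : List (List Int) × List Int :=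
  match st with
  | (runs, cur) =>
    match cur with
    | c :: _ =>
      if PySem.Int.mod c 2 = PySem.Int.mod x 2 then (runs, cur ++ [x])
      else (runs ++ [cur], [x])
    | [] => (runs, [x])

-- after the loop: 'if cur: runs.append(cur)'
def pvFin (st : List (List Int) × List Int) : List (List Int) :=
  if st.2 ≠ [] then st.1 ++ [st.2] else st.1

-- the comprehension's filter/emit: 'run[0] if len(run) == 1 and run[0] % 2 == 0'
def pvPickRun (run : List Int) : Option Int :=
  match run with
  | [r] => if PySem.Int.mod r 2 = 0 then some r else none
  | _ => none

def encontraNumParEntreImpars_alt (lista : List Int) : List Int :=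
  (PySem.List.slice (pvFin (lista.foldl pvStepB ([], []))) (some 1) (some (-1))).filterMap
    pvPickRun

-- ===== PRECONDITION & SPEC =====
def Spec_encontraNumParEntreImpars (lista : List Int) (out : List Int) : Prop := out = encontraNumParEntreImpars_alt lista
instance (lista : List Int) (out : List Int) : Decidable (Spec_encontraNumParEntreImpars lista out) := by unfold Spec_encontraNumParEntreImpars; infer_instance

-- ===== CLAIM (what is proved, stated in full; the proofs are below) =====
def Claim_equal_encontraNumParEntreImpars : Prop := ∀ (lista : List Int), Dom_encontraNumParEntreImpars lista → Spec_encontraNumParEntreImpars lista (encontraNumParEntreImpars lista)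

-- ===== LEMMAS AND PROOFS =====

-- common reference: window scan carrying the previous element
def pvTriples : Int → List Int → List Int
  | _, [] => []
  | _, [_] => []
  | a, b :: c :: t =>
    (if PySem.Int.mod b 2 = 0 ∧ PySem.Int.mod a 2 ≠ 0 ∧ PySem.Int.mod c 2 ≠ 0 then [b] else [])
      ++ pvTriples b (c :: t)

theorem pvLoopA : ∀ (s lista : List Int) (k : Nat) (acc : List Int) (prev : Int),
    1 ≤ k → lista.drop (k - 1) = prev :: s →
    (s.foldl (pvStepA lista) (acc, (k : Int))).1 = acc ++ pvTriples prev s := by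
  intro s
  induction s with
  | nil => intro lista k acc prev _ _; simp [pvTriples]
  | cons v rest ih =>
    intro lista k acc prev hk hdrop
    have hlen : lista.length = k + 1 + rest.length := by
      have := congrArg List.length hdrop
      simp [List.length_drop] at this; omega
    have hprev : PySem.List.pyGet? lista ((k : Int) - 1) = some prev := by
      have h1 : ((k : Int) - 1) = ((k - 1 : Nat) : Int) := by omega
      rw [h1, PySem.List.pyGet?_natCast]
      have : lista[k - 1 + 0]? = (prev :: v :: rest)[0]? := by
        rw [← List.getElem?_drop, hdrop]
      simpa using this
    have hdropk : lista.drop k = v :: rest := by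
      have hkk : k = (k - 1) + 1 := by omega
      rw [hkk, ← List.drop_drop, hdrop]
      rfl
    simp only [List.foldl_cons]
    cases rest with
    | nil =>
      have hle : ¬ ((k : Int) ≤ (lista.length : Int) - 2) := by
        rw [hlen]; push_cast [List.length_nil]; omega
      simp [pvStepA, hle, pvTriples]
    | cons c t =>
      have hnext : PySem.List.pyGet? lista ((k : Int) + 1) = some c := by
        have h1 : ((k : Int) + 1) = ((k + 1 : Nat) : Int) := by omega
        rw [h1, PySem.List.pyGet?_natCast]
        have : lista[k - 1 + 2]? = (prev :: v :: c :: t)[2]? := by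
          rw [← List.getElem?_drop, hdrop]
        have hkk : k - 1 + 2 = k + 1 := by omega
        rw [hkk] at this; simpa using this
      have hidx : ((k : Int) > 0 ∧ (k : Int) ≤ (lista.length : Int) - 2) := by
        rw [hlen]; push_cast [List.length_cons]; omega
      have hrec := ih lista (k + 1) (((pvStepA lista (acc, (k : Int)) v)).1) v
        (by omega) (by simpa using hdropk)
      have hk1i : (((k + 1 : Nat)) : Int) = (k : Int) + 1 := by push_cast; ring
      rw [hk1i] at hrec
      calc ((c :: t).foldl (pvStepA lista) (pvStepA lista (acc, (k : Int)) v)).1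
          = ((pvStepA lista (acc, (k : Int)) v).1) ++ pvTriples v (c :: t) := by
            rw [← hrec]; rfl
        _ = acc ++ pvTriples prev (v :: c :: t) := by
            simp only [pvStepA, hprev, hnext, pvTriples]
            rw [← List.append_assoc]
            congr 1
            have hk0 : 0 < k := hk
            by_cases h1 : (2 : Int) ∣ v <;>
              by_cases h2 : prev % 2 = 1 <;>
                by_cases h3 : c % 2 = 1 <;>
                  simp [hidx.2, hk0, h1, h2, h3]

-- A computes exactly the window scan
theorem pvA_eq : ∀ (a : Int) (s : List Int),
    encontraNumParEntreImpars (a :: s) = pvTriples a s := by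
  intro a s
  match s with
  | [] => simp [encontraNumParEntreImpars, pvTriples]
  | [b] => simp [encontraNumParEntreImpars, pvTriples]
  | b :: c :: t =>
    have hlen : (2 : Int) < ((a :: b :: c :: t).length : Int) := by
      push_cast [List.length_cons]; omega
    have h0step : pvStepA (a :: b :: c :: t) ([], 0) a = ([], (1 : Int)) := by
      simp [pvStepA]
    simp only [encontraNumParEntreImpars, if_pos hlen, List.foldl_cons, h0step]
    have := pvLoopA (b :: c :: t) (a :: b :: c :: t) 1 [] a (le_refl 1) (by simp)
    simpa using this

-- ---- B side: run-length grouping ----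

-- grouping with an open current run h :: t (mirrors stage 1's state)
def pvGrWith (h : Int) (t : List Int) : List Int → List (List Int)
  | [] => [h :: t]
  | x :: xs =>
    if PySem.Int.mod h 2 = PySem.Int.mod x 2 then pvGrWith h (t ++ [x]) xs
    else (h :: t) :: pvGrWith x [] xs

def pvGr : List Int → List (List Int)
  | [] => []
  | b :: s => pvGrWith b [] s

-- emit every run except the last one
def pvGo : List (List Int) → List Int
  | [] => []
  | [_] => []
  | r :: r' :: rs => (pvPickRun r).toList ++ pvGo (r' :: rs)

theorem pvFoldB : ∀ (xs : List Int) (runs : List (List Int)) (h : Int) (t : List Int),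
    pvFin (xs.foldl pvStepB (runs, h :: t)) = runs ++ pvGrWith h t xs := by
  intro xs
  induction xs with
  | nil => intro runs h t; simp [pvFin, pvGrWith]
  | cons x xs ih =>
    intro runs h t
    have hstep : pvStepB (runs, h :: t) x =
        if PySem.Int.mod h 2 = PySem.Int.mod x 2 then (runs, h :: (t ++ [x]))
        else (runs ++ [h :: t], [x]) := by
      simp only [pvStepB]; split_ifs <;> rfl
    rw [List.foldl_cons, hstep]
    by_cases hp : PySem.Int.mod h 2 = PySem.Int.mod x 2
    · rw [if_pos hp, ih runs h (t ++ [x])]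
      conv_rhs => rw [pvGrWith]
      rw [if_pos hp]
    · rw [if_neg hp, ih (runs ++ [h :: t]) x []]
      conv_rhs => rw [pvGrWith]
      rw [if_neg hp, List.append_assoc, List.singleton_append]

theorem pvGrWith_char : ∀ (xs : List Int) (h : Int) (t : List Int),
    pvGrWith h t xs =
      (h :: (t ++ xs.takeWhile (fun y => PySem.Int.mod h 2 = PySem.Int.mod y 2))) ::
        (match xs.dropWhile (fun y => PySem.Int.mod h 2 = PySem.Int.mod y 2) with
         | [] => ([] : List (List Int))
         | z :: zs => pvGrWith z [] zs) := by
  intro xs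
  induction xs with
  | nil => intro h t; simp [pvGrWith]
  | cons x xs ih =>
    intro h t
    by_cases hp : PySem.Int.mod h 2 = PySem.Int.mod x 2
    · have hd : (decide (PySem.Int.mod h 2 = PySem.Int.mod x 2)) = true := decide_eq_true hp
      conv_lhs => rw [pvGrWith]
      rw [if_pos hp, ih h (t ++ [x]), List.takeWhile_cons, List.dropWhile_cons, hd]
      simp only [if_true, List.append_assoc, List.singleton_append]
    · have hd : (decide (PySem.Int.mod h 2 = PySem.Int.mod x 2)) = false := decide_eq_false hp
      conv_lhs => rw [pvGrWith]
      rw [if_neg hp, List.takeWhile_cons, List.dropWhile_cons, hd]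
      simp only [Bool.false_eq_true, if_false, List.append_nil]

theorem pvGrWith_ne_nil (h : Int) (t xs : List Int) : pvGrWith h t xs ≠ [] := by
  rw [pvGrWith_char]; simp

theorem pvGo_cons_none {r : List Int} (hr : pvPickRun r = none)
    (rs : List (List Int)) : pvGo (r :: rs) = pvGo rs := by
  cases rs with
  | nil => rfl
  | cons r' rs' => simp [pvGo, hr]

theorem pvGo_eq : ∀ (rs : List (List Int)), pvGo rs = rs.dropLast.filterMap pvPickRun := by
  intro rs
  induction rs with
  | nil => rfl
  | cons r rs ih =>
    cases rs with
    | nil => rfl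
    | cons r' rs' =>
      simp only [pvGo, ih, List.dropLast_cons₂, List.filterMap_cons]
      cases h : pvPickRun r <;> simp

-- main lemma: the window scan over a :: s is the interior-run selection
theorem pvMain : ∀ (s : List Int) (a : Int),
    pvTriples a s = pvGo ((pvGr (a :: s)).drop 1) := by
  have hm : ∀ x : Int, PySem.Int.mod x 2 = x % 2 := fun x =>
    PySem.Int.mod_eq_emod_of_pos (by omega)
  intro s
  induction s with
  | nil => intro a; simp [pvTriples, pvGr, pvGrWith, pvGo]
  | cons b s' ih =>
    intro a
    cases s' with
    | nil =>
      simp [pvTriples, pvGr, pvGrWith]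
      split_ifs <;> rfl
    | cons c s'' =>
      have ihb := ih b
      have hgr : pvGr (b :: c :: s'') = pvGrWith b [] (c :: s'') := rfl
      have hga : pvGr (a :: b :: c :: s'') =
          if a % 2 = b % 2 then pvGrWith a [b] (c :: s'')
          else [a] :: pvGrWith b [] (c :: s'') := by
        show pvGrWith a [] (b :: c :: s'') = _
        rw [pvGrWith]
        simp only [List.nil_append, hm]
      have htri : pvTriples a (b :: c :: s'') =
          (if b % 2 = 0 ∧ a % 2 ≠ 0 ∧ c % 2 ≠ 0 then [b] else []) ++
            pvTriples b (c :: s'') := by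
        rw [pvTriples]; simp only [hm]
      by_cases hab : a % 2 = b % 2
      · -- a and b share parity: b is never emitted, and the first runs merge
        have hemit : ¬ (b % 2 = 0 ∧ a % 2 ≠ 0 ∧ c % 2 ≠ 0) := by
          rintro ⟨h1, h2, -⟩; omega
        rw [htri, hga, if_pos hab, if_neg hemit, List.nil_append]
        have hdrop : (pvGrWith a [b] (c :: s'')).drop 1
            = (pvGrWith b [] (c :: s'')).drop 1 := by
          rw [pvGrWith_char, pvGrWith_char]
          simp only [List.drop_succ_cons, List.drop_zero]
          have hfun : (fun y => decide (PySem.Int.mod a 2 = PySem.Int.mod y 2))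
              = (fun y => decide (PySem.Int.mod b 2 = PySem.Int.mod y 2)) := by
            funext y; simp only [hm, hab]
          rw [hfun]
        rw [hdrop, ← hgr]
        exact ihb
      · -- parities differ: the grouping starts a fresh run [a]
        rw [htri, hga, if_neg hab, List.drop_succ_cons, List.drop_zero]
        rw [hgr] at ihb
        by_cases hbc : b % 2 = c % 2
        · -- b,c share parity: the run of b is not a singleton, nothing emitted
          have hemit : ¬ (b % 2 = 0 ∧ a % 2 ≠ 0 ∧ c % 2 ≠ 0) := by
            rintro ⟨h1, -, h3⟩; omega
          rw [if_neg hemit, List.nil_append]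
          have hbc' : PySem.Int.mod b 2 = PySem.Int.mod c 2 := by
            rw [hm, hm]; exact hbc
          have hrun : pvGrWith b [] (c :: s'') = pvGrWith b [c] s'' := by
            rw [pvGrWith, if_pos hbc', List.nil_append]
          rw [hrun, pvGrWith_char] at ihb ⊢
          simp only [List.drop_succ_cons, List.drop_zero] at ihb
          rw [pvGo_cons_none rfl]
          exact ihb
        · -- b is a singleton run: emitted iff even (its neighbours are forced odd)
          have hbc' : ¬ PySem.Int.mod b 2 = PySem.Int.mod c 2 := by
            rw [hm, hm]; exact hbc
          have hrun : pvGrWith b [] (c :: s'') = [b] :: pvGrWith c [] s'' := by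
            rw [pvGrWith, if_neg hbc']
          rw [hrun] at ihb ⊢
          simp only [List.drop_succ_cons, List.drop_zero] at ihb
          obtain ⟨m, ms, hms⟩ : ∃ m ms, pvGrWith c [] s'' = m :: ms := by
            cases hx : pvGrWith c [] s'' with
            | nil => exact absurd hx (pvGrWith_ne_nil c [] s'')
            | cons m ms => exact ⟨m, ms, rfl⟩
          rw [hms]
          rw [show pvGo ([b] :: m :: ms) = (pvPickRun [b]).toList ++ pvGo (m :: ms)
            from rfl, ← hms, ← ihb]
          congr 1
          rcases Int.emod_two_eq b with hb | hb
          · rw [if_pos ⟨hb, by omega, by omega⟩]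
            simp [pvPickRun, hb]
          · rw [if_neg (by omega)]
            simp [pvPickRun, hb]

-- slicing runs[1:-1]
theorem pvSlice11 (xs : List (List Int)) :
    PySem.List.slice xs (some 1) (some (-1)) = xs.tail.dropLast := by
  cases xs with
  | nil => rfl
  | cons y ys =>
    simp [PySem.List.slice, List.dropLast_eq_take]

-- ===== VERDICT (by name: the statement is the Claim_ definition above) =====
theorem encontraNumParEntreImpars_spec : Claim_equal_encontraNumParEntreImpars := by
  intro lista _
  unfold Spec_encontraNumParEntreImpars
  cases lista with
  | nil => rfl
  | cons a s =>
    rw [pvA_eq, pvMain]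
    unfold encontraNumParEntreImpars_alt
    rw [show (a :: s).foldl pvStepB ([], []) = s.foldl pvStepB ([], [a]) from rfl,
      pvFoldB s [] a []]
    rw [pvSlice11, pvGo_eq]
    simp [pvGr, List.drop_one]
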